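-- pv_equiv track=rewrite | github.com/anascacais/analysis-RESP-data | respiratoryanalysis/waveform.py | get_template_markers
-- ===== SOURCE A (Python) =====
-- def get_template_markers(device_overview, max_len=0):
--
--     markers = device_overview["peaks"] + device_overview["valleys"]
--     markers.sort()
--
--     templates_ind = []
--
--     for i in range(0, len(markers)-1, 4):
--
--         try:
--             midpoint_start = int((markers[i+1] + markers[i]) / 2)
--             midpoint_end = int((markers[i+3] + markers[i+2]) / 2)
--             max_len = max(max_len, midpoint_end - midpoint_start)
--             templates_ind += [[midpoint_start, midpoint_end]]
--         except:
--             pass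
--
--     return templates_ind, max_len
-- ===== SOURCE B (Python) =====
-- def get_template_markers(device_overview, max_len=0):
--     markers = sorted(device_overview["peaks"] + device_overview["valleys"])
--     # pair consecutive disjoint elements -> midpoints, then pair midpoints -> intervals
--     it = iter(markers)
--     mids = [int((a + b) / 2) for a, b in zip(it, it)]
--     it2 = iter(mids)
--     pairs = list(zip(it2, it2))
--     templates_ind = [[s, e] for s, e in pairs]
--     for s, e in pairs:
--         max_len = max(max_len, e - s)
--     return templates_ind, max_len
-- ===== Notes on version B (the rewrite author's own statement) =====
-- stated objective: simpler
-- what changed: Replaces the stride-4 index loop with try/except IndexError by a two-stage pairwise decomposition: zip consecutive markers into midpoints, then zip midpoints into intervals, so only complete groups are ever formed and no indexing or exception handling is needed.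
import Mathlib
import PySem

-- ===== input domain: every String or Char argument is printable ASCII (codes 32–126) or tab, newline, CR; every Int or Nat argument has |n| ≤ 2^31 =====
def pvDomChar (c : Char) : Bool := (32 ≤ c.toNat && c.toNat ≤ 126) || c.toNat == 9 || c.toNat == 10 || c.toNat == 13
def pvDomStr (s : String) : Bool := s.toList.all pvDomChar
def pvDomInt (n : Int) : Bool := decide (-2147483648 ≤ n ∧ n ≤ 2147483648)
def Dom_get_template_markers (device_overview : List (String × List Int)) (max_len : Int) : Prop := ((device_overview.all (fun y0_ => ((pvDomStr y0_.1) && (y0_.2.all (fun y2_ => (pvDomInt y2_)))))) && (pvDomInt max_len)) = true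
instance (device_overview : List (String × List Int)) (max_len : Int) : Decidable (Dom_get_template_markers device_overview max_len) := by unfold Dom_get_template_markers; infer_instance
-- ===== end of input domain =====

-- B replaces A's stride-4 index loop with try/except by two pairwise zip passes
-- (markers -> midpoints -> intervals); objective: simpler (same cost).


-- ===== PORT A =====
-- loop body of A's 'for i in range(0, len(markers)-1, 4)'; the try/except whose body
-- indexes markers[i..i+3] = the match (any IndexError -> catch-all = pass);
-- int((x+y)/2) = PySem.Int.truncdiv, exact here since |x+y| ≤ 2^32 < 2^53 on Dom
def pvStepA (markers : List Int) (st : List (List Int) × Int) (i : Int) : List (List Int) × Int :=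
  match PySem.List.pyGet? markers (i+1), PySem.List.pyGet? markers i,
        PySem.List.pyGet? markers (i+3), PySem.List.pyGet? markers (i+2) with
  | some m1, some m0, some m3, some m2 =>
      let midpoint_start := PySem.Int.truncdiv (m1 + m0) 2
      let midpoint_end := PySem.Int.truncdiv (m3 + m2) 2
      (st.1 ++ [[midpoint_start, midpoint_end]], max st.2 (midpoint_end - midpoint_start))
  | _, _, _, _ => st

def get_template_markers (device_overview : List (String × List Int)) (max_len : Int) : List (List Int) × Int :=
  match device_overview.lookup "peaks", device_overview.lookup "valleys" with
  | some peaks, some valleys =>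
      let markers := PySem.List.sorted (peaks ++ valleys) (fun x => x) false
      (PySem.List.pyRange 0 ((markers.length : Int) - 1) 4).foldl (pvStepA markers) ([], max_len)
  | _, _ => ([], max_len)   -- unreachable under Pre_ (Python raises KeyError here)

-- ===== PORT B =====
-- zip(it, it) on a single iterator = consecutive disjoint pairs
def pvChunk2 {α : Type} : List α → List (α × α)
  | a :: b :: rest => (a, b) :: pvChunk2 rest
  | _ => []

def get_template_markers_alt (device_overview : List (String × List Int)) (max_len : Int) : List (List Int) × Int :=
  match device_overview.lookup "peaks", device_overview.lookup "valleys" with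
  | some peaks, some valleys =>
      let markers := PySem.List.sorted (peaks ++ valleys) (fun x => x) false
      let mids := (pvChunk2 markers).map (fun p => PySem.Int.truncdiv (p.1 + p.2) 2)
      let pairs := pvChunk2 mids
      (pairs.map (fun p => [p.1, p.2]),
       pairs.foldl (fun m p => max m (p.2 - p.1)) max_len)
  | _, _ => ([], max_len)   -- unreachable under Pre_ (Python raises KeyError here)

-- ===== PRECONDITION & SPEC =====
-- Pre_ excludes exactly the inputs where Python A raises KeyError (missing "peaks"/"valleys" key)
def Pre_get_template_markers (device_overview : List (String × List Int)) (max_len : Int) : Prop :=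
  (device_overview.lookup "peaks").isSome = true ∧ (device_overview.lookup "valleys").isSome = true
instance (device_overview : List (String × List Int)) (max_len : Int) : Decidable (Pre_get_template_markers device_overview max_len) := by unfold Pre_get_template_markers; infer_instance

def pvWitness_get_template_markers : (List (String × List Int)) × Int := ([("peaks", [1, 7, 3]), ("valleys", [2, 10])], 0)

def Spec_get_template_markers (device_overview : List (String × List Int)) (max_len : Int) (out : List (List Int) × Int) : Prop := out = get_template_markers_alt device_overview max_len
instance (device_overview : List (String × List Int)) (max_len : Int) (out : List (List Int) × Int) : Decidable (Spec_get_template_markers device_overview max_len out) := by unfold Spec_get_template_markers; infer_instance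

-- ===== CLAIM (what is proved, stated in full; the proofs are below) =====
def Claim_equal_get_template_markers : Prop := ∀ (device_overview : List (String × List Int)) (max_len : Int), Dom_get_template_markers device_overview max_len → Pre_get_template_markers device_overview max_len → Spec_get_template_markers device_overview max_len (get_template_markers device_overview max_len)

-- ===== LEMMAS AND PROOFS =====

theorem pvGet_cons_add_one {α : Type} (x : α) (xs : List α) (i : Int) (h : 0 ≤ i) :
    PySem.List.pyGet? (x :: xs) (i + 1) = PySem.List.pyGet? xs i := by
  rw [PySem.List.pyGet?_of_nonneg _ (by omega : (0:Int) ≤ i + 1), PySem.List.pyGet?_of_nonneg _ h]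
  have : (i + 1).toNat = i.toNat + 1 := by omega
  rw [this, List.getElem?_cons_succ]

-- with a nonnegative loop index, A's step over a 4-cons list is its step over the tail, shifted
theorem pvStepA_shift (a b c d : Int) (rest : List Int) (st : List (List Int) × Int)
    (i : Int) (h : 0 ≤ i) :
    pvStepA (a :: b :: c :: d :: rest) st (i + 4) = pvStepA rest st i := by
  have hGet : ∀ j : Int, 0 ≤ j →
      PySem.List.pyGet? (a :: b :: c :: d :: rest) (j + 4) = PySem.List.pyGet? rest j := by
    intro j hj
    rw [show j+4 = (j+3)+1 from by ring, pvGet_cons_add_one _ _ _ (by omega),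
        show j+3 = (j+2)+1 from by ring, pvGet_cons_add_one _ _ _ (by omega),
        show j+2 = (j+1)+1 from by ring, pvGet_cons_add_one _ _ _ (by omega),
        pvGet_cons_add_one _ _ _ hj]
  unfold pvStepA
  rw [show i+4+1 = (i+1)+4 from by ring, show i+4+3 = (i+3)+4 from by ring,
      show i+4+2 = (i+2)+4 from by ring,
      hGet (i+1) (by omega), hGet i h, hGet (i+3) (by omega), hGet (i+2) (by omega)]

-- a step-4 range with a nonempty span peels its first element
theorem pvRange4_cons (a b : Int) (h : a < b) :
    PySem.List.pyRange a b 4 = a :: PySem.List.pyRange (a+4) b 4 := by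
  rw [PySem.List.pyRange_of_pos a b (by norm_num), PySem.List.pyRange_of_pos (a+4) b (by norm_num)]
  by_cases h4 : a + 4 < b
  · simp only [if_pos h, if_pos h4]
    have : ((b - a + 4 - 1) / 4).toNat = ((b - (a+4) + 4 - 1) / 4).toNat + 1 := by omega
    rw [this, List.range_succ_eq_map, List.map_cons, List.map_map]
    refine List.cons_eq_cons.mpr ⟨by norm_num, List.map_congr_left ?_⟩
    intro k _
    simp [Function.comp]
    ring
  · simp only [if_pos h, if_neg h4]
    have : ((b - a + 4 - 1) / 4).toNat = 1 := by omega
    simp [this, List.range_succ]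

-- a step-4 range starting at 4 = the range starting at 0 with every element shifted by 4
theorem pvRange4_shift (b : Int) :
    PySem.List.pyRange 4 b 4 = (PySem.List.pyRange 0 (b-4) 4).map (· + 4) := by
  rw [PySem.List.pyRange_of_pos 4 b (by norm_num), PySem.List.pyRange_of_pos 0 (b-4) (by norm_num)]
  by_cases h : 4 < b
  · rw [if_pos h, if_pos (by omega : (0:Int) < b - 4)]
    rw [List.map_map]
    have hc : ((b - 4 + 4 - 1) / 4).toNat = ((b - 4 - 0 + 4 - 1) / 4).toNat := by norm_num
    rw [hc]
    refine List.map_congr_left ?_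
    intro k _; simp [Function.comp]; ring
  · rw [if_neg h, if_neg (by omega : ¬ (0:Int) < b - 4)]
    simp

-- the core loop equivalence, by four-at-a-time recursion on the sorted marker list
theorem pvLoop_eq : ∀ (m : List Int) (ts : List (List Int)) (ml : Int),
    (PySem.List.pyRange 0 ((m.length : Int) - 1) 4).foldl (pvStepA m) (ts, ml) =
      (ts ++ (pvChunk2 ((pvChunk2 m).map (fun p => PySem.Int.truncdiv (p.1 + p.2) 2))).map (fun p => [p.1, p.2]),
       (pvChunk2 ((pvChunk2 m).map (fun p => PySem.Int.truncdiv (p.1 + p.2) 2))).foldl (fun ml p => max ml (p.2 - p.1)) ml)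
  | [], ts, ml => by
      rw [show ((([] : List Int).length : Int) - 1) = -1 from by simp,
          show PySem.List.pyRange 0 (-1) 4 = [] from by decide]
      simp [pvChunk2]
  | [a], ts, ml => by
      rw [show ((([a] : List Int).length : Int) - 1) = 0 from by simp,
          show PySem.List.pyRange 0 0 4 = [] from by decide]
      simp [pvChunk2]
  | [a, b], ts, ml => by
      rw [show ((([a, b] : List Int).length : Int) - 1) = 1 from by simp,
          show PySem.List.pyRange 0 1 4 = [0] from by decide]
      simp [pvStepA, pvChunk2, PySem.List.pyGet?, PySem.List.pyIdx?]
  | [a, b, c], ts, ml => by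
      rw [show ((([a, b, c] : List Int).length : Int) - 1) = 2 from by simp,
          show PySem.List.pyRange 0 2 4 = [0] from by decide]
      simp [pvStepA, pvChunk2, PySem.List.pyGet?, PySem.List.pyIdx?]
  | a :: b :: c :: d :: rest, ts, ml => by
      have hlen : (((a :: b :: c :: d :: rest).length : Int) - 1) = (rest.length : Int) + 3 := by
        simp; omega
      rw [hlen, pvRange4_cons 0 _ (by positivity), List.foldl_cons]
      have hstep0 : pvStepA (a :: b :: c :: d :: rest) (ts, ml) 0 =
          (ts ++ [[PySem.Int.truncdiv (b + a) 2, PySem.Int.truncdiv (d + c) 2]],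
           max ml (PySem.Int.truncdiv (d + c) 2 - PySem.Int.truncdiv (b + a) 2)) := by
        have e1 : (0:Int) ≤ (rest.length:Int) + 1 + 1 := by positivity
        have e2 : (0:Int) ≤ (rest.length:Int) + 1 + 1 + 1 := by positivity
        have e3 : (3:Int) ≤ (rest.length:Int) + 1 + 1 + 1 := by omega
        have e4 : (2:Int) ≤ (rest.length:Int) + 1 + 1 + 1 := by omega
        simp [pvStepA, PySem.List.pyGet?, PySem.List.pyIdx?, e1, e2, e3, e4]
      rw [hstep0, show (0:Int) + 4 = 4 from by norm_num, pvRange4_shift, List.foldl_map]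
      rw [PySem.List.foldl_congr_mem _ _ (pvStepA rest) _ (by
        intro st j hj
        have h0 : 0 ≤ j := by
          rcases (PySem.List.mem_pyRange_iff_of_pos (by norm_num) j).mp hj with ⟨h1, _⟩
          exact h1
        exact pvStepA_shift a b c d rest st j h0)]
      have harg : (rest.length : Int) + 3 - 4 = (rest.length : Int) - 1 := by ring
      rw [harg, pvLoop_eq rest (ts ++ [[PySem.Int.truncdiv (b + a) 2, PySem.Int.truncdiv (d + c) 2]])
            (max ml (PySem.Int.truncdiv (d + c) 2 - PySem.Int.truncdiv (b + a) 2))]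
      simp [pvChunk2, Int.add_comm]

-- ===== VERDICT (by name: the statement is the Claim_ definition above) =====
theorem get_template_markers_spec : Claim_equal_get_template_markers := by
  intro d ml _ hpre
  obtain ⟨h1, h2⟩ := hpre
  unfold Spec_get_template_markers get_template_markers get_template_markers_alt
  obtain ⟨peaks, hp⟩ := Option.isSome_iff_exists.mp h1
  obtain ⟨valleys, hv⟩ := Option.isSome_iff_exists.mp h2
  rw [hp, hv]
  simpa using pvLoop_eq (PySem.List.sorted (peaks ++ valleys) (fun x => x) false) [] ml
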